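-- pv_equiv track=rewrite | github.com/matuspintek-boop/ib111 | 05/p5_course.py | check
-- ===== SOURCE A (Python) =====
-- def check(marks: dict[int, str]) -> bool:
--
--     possible: dict[str, set[str]] = {
--         "exam": set(['A', 'B', 'C', 'D', 'E', 'F', 'X', '-']),
--         "colocvium": set(['P', 'N', '-']),
--         "zap": set(['Z', 'N', '-'])
--     }
--
--     candidates: set[str] = set(possible.keys())
--
--     for mark in marks.values():
--         to_delete = []
--         for key in candidates:
--             if mark not in possible[key]:
--                 to_delete.append(key)
--
--         for key in to_delete:
--             candidates.remove(key)
--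
--     return len(candidates) > 0
-- ===== SOURCE B (Python) =====
-- def check(marks: dict[int, str]) -> bool:
--     possible: dict[str, set[str]] = {
--         "exam": set(['A', 'B', 'C', 'D', 'E', 'F', 'X', '-']),
--         "colocvium": set(['P', 'N', '-']),
--         "zap": set(['Z', 'N', '-'])
--     }
--     vals = set(marks.values())
--     return any(vals <= s for s in possible.values())
-- ===== Notes on version B (the rewrite author's own statement) =====
-- stated objective: simpler
-- what changed: Replaces the candidate-elimination loop (per-mark build a to_delete list and remove candidates) with a build-then-test decomposition: form the set of distinct mark values once, then test whether any category's symbol set is a superset.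
import Mathlib
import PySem

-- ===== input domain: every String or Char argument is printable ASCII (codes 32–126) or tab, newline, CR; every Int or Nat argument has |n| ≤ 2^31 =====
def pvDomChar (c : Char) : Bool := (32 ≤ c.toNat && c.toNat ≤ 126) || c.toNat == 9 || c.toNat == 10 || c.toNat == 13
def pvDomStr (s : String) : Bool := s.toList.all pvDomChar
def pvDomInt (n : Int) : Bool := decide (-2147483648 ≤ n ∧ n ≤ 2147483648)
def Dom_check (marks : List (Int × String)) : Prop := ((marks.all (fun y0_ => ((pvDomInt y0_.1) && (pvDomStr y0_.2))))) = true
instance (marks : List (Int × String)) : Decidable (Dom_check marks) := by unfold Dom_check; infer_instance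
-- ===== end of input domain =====

-- B is simpler: A eliminates candidate categories mark by mark; B builds the set of
-- distinct mark values once and tests whether any category's symbol set is a superset.

-- ===== PORT A =====
-- the literal dict 'possible' of A (and B): category name -> symbol set
def pvPossible : PySem.Dict String (PySem.Set String) :=
  PySem.Dict.ofList
    [("exam", PySem.Set.ofList ["A", "B", "C", "D", "E", "F", "X", "-"]),
     ("colocvium", PySem.Set.ofList ["P", "N", "-"]),
     ("zap", PySem.Set.ofList ["Z", "N", "-"])]

-- one iteration of A's outer loop: build to_delete, then remove each of its keys
-- (iterating over the set 'candidates' is order-insensitive here: the result is a set)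
def pvStep (cands : PySem.Set String) (mark : String) : PySem.Set String :=
  let toDelete := cands.filter (fun key => !(PySem.Set.contains (pvPossible.getD key []) mark))
  toDelete.foldl (fun c k => (PySem.Set.remove? c k).getD c) cands

def check (marks : List (Int × String)) : Bool :=
  let candidates := PySem.Set.ofList pvPossible.keys
  let final := ((PySem.Dict.ofList marks).values).foldl pvStep candidates
  decide (PySem.Set.len final > 0)

-- ===== PORT B =====
def check_alt (marks : List (Int × String)) : Bool :=
  let vals := PySem.Set.ofList ((PySem.Dict.ofList marks).values)
  pvPossible.values.any (fun s => PySem.Set.issubset vals s)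

-- ===== PRECONDITION & SPEC =====
def Spec_check (marks : List (Int × String)) (out : Bool) : Prop := out = check_alt marks
instance (marks : List (Int × String)) (out : Bool) : Decidable (Spec_check marks out) := by unfold Spec_check; infer_instance

-- ===== CLAIM (what is proved, stated in full; the proofs are below) =====
def Claim_equal_check : Prop := ∀ (marks : List (Int × String)), Dom_check marks → Spec_check marks (check marks)

-- ===== LEMMAS AND PROOFS =====

-- one 'candidates.remove(k)' on a cons cell whose head is not k keeps the head
theorem pv_remove_cons {α : Type} [BEq α] [LawfulBEq α] (a k : α) (c : List α) (h : k ≠ a) :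
    ((PySem.Set.remove? (a :: c) k).getD (a :: c) : List α)
      = a :: (PySem.Set.remove? c k).getD c := by
  by_cases hm : k ∈ c
  · rw [PySem.Set.remove?_of_mem (List.mem_cons_of_mem _ hm), PySem.Set.remove?_of_mem hm]
    simp [PySem.Set.discard, Ne.symm h]
  · have h1 : PySem.Set.remove? c k = none := by
      rw [PySem.Set.remove?_eq_none_iff]; exact hm
    have h2 : PySem.Set.remove? (a :: c) k = none := by
      rw [PySem.Set.remove?_eq_none_iff]
      simp [h, hm]
    simp [h1, h2]

-- removing the elements of to_delete (none of which is the head a) keeps the head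
theorem pv_foldl_remove_cons {α : Type} [BEq α] [LawfulBEq α] (td : List α) (a : α) (c : List α)
    (ha : a ∉ td) :
    td.foldl (fun c k => ((PySem.Set.remove? c k).getD c : List α)) (a :: c)
      = a :: td.foldl (fun c k => (PySem.Set.remove? c k).getD c) c := by
  induction td generalizing c with
  | nil => rfl
  | cons k td ih =>
    have hk : k ≠ a := fun h => ha (h ▸ List.mem_cons_self ..)
    simp only [List.foldl_cons, pv_remove_cons a k c hk]
    exact ih _ (fun h' => ha (List.mem_cons_of_mem _ h'))

-- A's inner two loops (build to_delete from a nodup candidate set, then remove each) = filter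
theorem pv_step_eq_filter {α : Type} [BEq α] [LawfulBEq α] (c : List α) (hn : c.Nodup) (p : α → Bool) :
    (c.filter (fun k => !(p k))).foldl (fun c k => ((PySem.Set.remove? c k).getD c : List α)) c
      = c.filter p := by
  induction c with
  | nil => rfl
  | cons a c ih =>
    have hna : a ∉ c := (List.nodup_cons.mp hn).1
    have hnc : c.Nodup := (List.nodup_cons.mp hn).2
    by_cases hp : p a = true
    · rw [List.filter_cons_of_neg (by simp [hp]), List.filter_cons_of_pos hp,
        pv_foldl_remove_cons _ _ _ (by simp [hna]), ih hnc]
    · rw [List.filter_cons_of_pos (by simp [hp]), List.filter_cons_of_neg hp]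
      simp only [List.foldl_cons]
      rw [PySem.Set.remove?_of_mem (List.mem_cons_self ..)]
      have hc : (PySem.Set.discard (a :: c) a : List α) = c := by
        simp only [PySem.Set.discard, List.filter_cons]
        simp only [beq_self_eq_true, Bool.not_true, Bool.false_eq_true, if_false]
        exact List.filter_eq_self.mpr (fun y hy => by
          have hyna : y ≠ a := fun h => hna (h ▸ hy)
          simp [hyna])
      rw [Option.getD_some, hc, ih hnc]

-- the whole outer loop: fold of pvStep = filter by "every mark is in this category's set"
theorem pv_fold_step (vs : List String) (c : List String) (hn : c.Nodup) :
    vs.foldl pvStep c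
      = c.filter (fun k => vs.all (fun m => PySem.Set.contains (pvPossible.getD k []) m)) := by
  induction vs generalizing c with
  | nil => simp
  | cons m vs ih =>
    simp only [List.foldl_cons]
    have h1 : pvStep c m = c.filter (fun k => PySem.Set.contains (pvPossible.getD k []) m) :=
      pv_step_eq_filter c hn _
    rw [h1, ih _ (hn.filter _), List.filter_filter]
    simp [List.all_cons, Bool.and_comm]

-- set(vs).all p = vs.all p
theorem pv_all_ofList {α : Type} [BEq α] [LawfulBEq α] (vs : List α) (p : α → Bool) :
    (PySem.Set.ofList vs).all p = vs.all p := by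
  rw [Bool.eq_iff_iff]
  simp only [List.all_eq_true]
  exact ⟨fun h x hx => h x ((PySem.Set.mem_ofList vs x).mpr hx),
         fun h x hx => h x ((PySem.Set.mem_ofList vs x).mp hx)⟩

-- ===== VERDICT (by name: the statement is the Claim_ definition above) =====
theorem check_spec : Claim_equal_check := by
  intro marks _
  show decide (PySem.Set.len (((PySem.Dict.ofList marks).values).foldl pvStep
        (PySem.Set.ofList pvPossible.keys)) > 0)
      = pvPossible.values.any
          (fun s => PySem.Set.issubset (PySem.Set.ofList ((PySem.Dict.ofList marks).values)) s)
  set vs := (PySem.Dict.ofList marks).values with hvs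
  rw [pv_fold_step vs _ (by decide)]
  have hkeys : PySem.Set.ofList pvPossible.keys = ["exam", "colocvium", "zap"] := by decide
  have hvalues : pvPossible.values
      = [PySem.Set.ofList ["A", "B", "C", "D", "E", "F", "X", "-"],
         PySem.Set.ofList ["P", "N", "-"], PySem.Set.ofList ["Z", "N", "-"]] := by decide
  rw [hkeys, hvalues]
  have hsub : ∀ s : PySem.Set String,
      PySem.Set.issubset (PySem.Set.ofList vs) s = vs.all (fun m => PySem.Set.contains s m) := by
    intro s
    show (PySem.Set.ofList vs).all (fun x => s.contains x) = _
    exact pv_all_ofList vs _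
  simp only [List.any_cons, List.any_nil, hsub, Bool.or_false]
  have g1 : pvPossible.getD "exam" [] = PySem.Set.ofList ["A","B","C","D","E","F","X","-"] := by decide
  have g2 : pvPossible.getD "colocvium" [] = PySem.Set.ofList ["P","N","-"] := by decide
  have g3 : pvPossible.getD "zap" [] = PySem.Set.ofList ["Z","N","-"] := by decide
  rcases h1 : vs.all (fun m => PySem.Set.contains (PySem.Set.ofList ["A","B","C","D","E","F","X","-"]) m) with _ | _ <;>
  rcases h2 : vs.all (fun m => PySem.Set.contains (PySem.Set.ofList ["P","N","-"]) m) with _ | _ <;>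
  rcases h3 : vs.all (fun m => PySem.Set.contains (PySem.Set.ofList ["Z","N","-"]) m) with _ | _ <;>
    (simp only [List.filter_cons, List.filter_nil, g1, g2, g3, h1, h2, h3];
     simp [PySem.Set.len])
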